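-- pv_equiv track=rewrite | github.com/ogscriptkiddie/clauseguard | backend/classifier.py | _is_negated
-- ===== SOURCE A (Python) =====
-- NEGATION_WINDOW = 10
--
-- NEGATION_SIGNALS = [
--     "not", "never", "no", "don't", "do not", "will not", "won't",
--     "doesn't", "does not", "cannot", "can't", "shall not", "we don't",
--     "we do not", "we will not", "we never", "without",
-- ]
--
-- def _is_negated(text_lower: str, matched_keywords: list[str]) -> bool:
--     """
--     Checks whether matched keywords appear in a negated context.
--
--     Strategy: For each matched keyword, look at the N words immediately
--     before it in the text. If any negation signal appears in that window,
--     consider the match negated.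
--
--     This is deliberately simple — it catches the most common ToS negation
--     patterns ("we do not sell", "we never share") without false positives.
--     """
--     words = text_lower.split()
--
--     for keyword in matched_keywords:
--         keyword_lower = keyword.lower()
--         # Find positions of this keyword in the word list
--         keyword_words = keyword_lower.split()
--         n = len(keyword_words)
--
--         for i in range(len(words) - n + 1):
--             if words[i:i + n] == keyword_words:
--                 # Look at the window before this match
--                 window_start = max(0, i - NEGATION_WINDOW)
--                 window = ' '.join(words[window_start:i])
--
--                 for signal in NEGATION_SIGNALS:
--                     if signal in window:
--                         return True
--     return False
-- ===== SOURCE B (Python) =====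
-- NEGATION_WINDOW = 10
--
-- NEGATION_SIGNALS = [
--     "not", "never", "no", "don't", "do not", "will not", "won't",
--     "doesn't", "does not", "cannot", "can't", "shall not", "we don't",
--     "we do not", "we will not", "we never", "without",
-- ]
--
-- def _is_negated(text_lower: str, matched_keywords: list[str]) -> bool:
--     words = text_lower.split()
--     w = len(words)
--     # Precompute once, per word position, whether a negation signal occurs in
--     # the 10-word window before it (A recomputes this for every keyword).
--     flags = []
--     for i in range(w + 1):
--         window = ' '.join(words[max(0, i - NEGATION_WINDOW):i])
--         flags.append(any(sig in window for sig in NEGATION_SIGNALS))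
--     keyword_lists = [kw.lower().split() for kw in matched_keywords]
--     # Single pass over positions (loop order swapped vs A); keyword matching is
--     # only attempted at positions already known to be negated.
--     for i in range(w + 1):
--         if flags[i]:
--             for kws in keyword_lists:
--                 n = len(kws)
--                 if i + n <= w and words[i:i + n] == kws:
--                     return True
--     return False
-- ===== Notes on version B (the rewrite author's own statement) =====
-- stated objective: faster
-- what changed: B precomputes a per-position negation flag in one pass and then scans positions with the loop order swapped (keyword matching only attempted at flagged positions), instead of A re-joining and re-scanning the 10-word window for every keyword at every position.
import Mathlib
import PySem

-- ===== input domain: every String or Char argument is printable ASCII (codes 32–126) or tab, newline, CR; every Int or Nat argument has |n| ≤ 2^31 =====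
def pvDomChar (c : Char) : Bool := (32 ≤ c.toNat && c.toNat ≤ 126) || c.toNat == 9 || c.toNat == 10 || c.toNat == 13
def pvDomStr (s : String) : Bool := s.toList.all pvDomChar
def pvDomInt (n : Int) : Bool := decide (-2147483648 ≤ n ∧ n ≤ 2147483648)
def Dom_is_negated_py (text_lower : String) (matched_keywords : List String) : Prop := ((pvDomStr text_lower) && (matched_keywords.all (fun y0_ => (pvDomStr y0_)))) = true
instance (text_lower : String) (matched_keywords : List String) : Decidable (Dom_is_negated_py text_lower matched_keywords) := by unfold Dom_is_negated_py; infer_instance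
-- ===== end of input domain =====

-- B precomputes per-position negation flags once and swaps the loop order (positions outer,
-- keywords inner); same return value, fewer window re-scans. Objective: faster.

def pvNegationSignals : List String :=
  ["not", "never", "no", "don't", "do not", "will not", "won't",
   "doesn't", "does not", "cannot", "can't", "shall not", "we don't",
   "we do not", "we will not", "we never", "without"]

-- ===== PORT A =====
def is_negated_py (text_lower : String) (matched_keywords : List String) : Bool :=
  let words := PySem.Str.split₀ text_lower
  matched_keywords.any fun keyword =>
    let keywordWords := PySem.Str.split₀ (PySem.Str.lower keyword)
    let n := keywordWords.length
    (PySem.List.pyRange 0 ((words.length : Int) - (n : Int) + 1) 1).any fun i =>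
      (PySem.List.slice words (some i) (some (i + (n : Int))) == keywordWords) &&
        (pvNegationSignals.any fun signal =>
          PySem.Str.isIn signal
            (PySem.Str.join " " (PySem.List.slice words (some (max 0 (i - 10))) (some i))))

-- ===== PORT B =====
def is_negated_py_alt (text_lower : String) (matched_keywords : List String) : Bool :=
  let words := PySem.Str.split₀ text_lower
  let w := words.length
  let flags := (List.range (w + 1)).map fun (i : Nat) =>
    pvNegationSignals.any fun signal =>
      PySem.Str.isIn signal
        (PySem.Str.join " " (PySem.List.slice words (some (max 0 ((i : Int) - 10))) (some (i : Int))))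
  let keywordLists := matched_keywords.map fun kw => PySem.Str.split₀ (PySem.Str.lower kw)
  (List.range (w + 1)).any fun (i : Nat) =>
    flags.getD i false && keywordLists.any fun kws =>
      decide (i + kws.length ≤ w) &&
        (PySem.List.slice words (some (i : Int)) (some ((i : Int) + (kws.length : Int))) == kws)

-- ===== PRECONDITION & SPEC =====
def Spec_is_negated_py (text_lower : String) (matched_keywords : List String) (out : Bool) : Prop := out = is_negated_py_alt text_lower matched_keywords
instance (text_lower : String) (matched_keywords : List String) (out : Bool) : Decidable (Spec_is_negated_py text_lower matched_keywords out) := by unfold Spec_is_negated_py; infer_instance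

-- ===== CLAIM (what is proved, stated in full; the proofs are below) =====
def Claim_equal_is_negated_py : Prop := ∀ (text_lower : String) (matched_keywords : List String), Dom_is_negated_py text_lower matched_keywords → Spec_is_negated_py text_lower matched_keywords (is_negated_py text_lower matched_keywords)

-- ===== LEMMAS AND PROOFS =====

-- ===== VERDICT (by name: the statement is the Claim_ definition above) =====
theorem is_negated_py_spec : Claim_equal_is_negated_py := by
  intro t m _
  unfold Spec_is_negated_py
  simp only [is_negated_py, is_negated_py_alt]
  rw [Bool.eq_iff_iff]
  simp only [List.any_eq_true, Bool.and_eq_true, List.mem_map, PySem.List.mem_pyRange_one,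
             List.mem_range, beq_iff_eq, decide_eq_true_eq]
  constructor
  · rintro ⟨kw, hkw, i, ⟨h0, hi⟩, hmatch, hsig⟩
    have hcast : ((i.toNat : Int)) = i := Int.toNat_of_nonneg h0
    refine ⟨i.toNat, by omega, ?_, ?_⟩
    · rw [PySem.List.getD_map_range _ _ _ _ (by omega)]
      rw [hcast, List.any_eq_true]; exact hsig
    · exact ⟨_, ⟨kw, hkw, rfl⟩, by omega, by rw [hcast]; exact hmatch⟩
  · rintro ⟨j, hj, hflag, kws, ⟨kw, hkw, rfl⟩, hle, hmatch⟩
    rw [PySem.List.getD_map_range _ _ _ _ hj] at hflag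
    rw [List.any_eq_true] at hflag
    exact ⟨kw, hkw, (j : Int), ⟨by omega, by omega⟩, hmatch, hflag⟩
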